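-- pv_equiv track=rewrite | github.com/aubejay22/Index_Tracking | prafe/solution/heuristic.py | _generate_investments
-- ===== SOURCE A (Python) =====
-- def _generate_investments(stock_list, step, total_budget):
--     num_stocks = len(stock_list)
--
--     # Define a recursive function to handle the partitioning.
--     def _partition(number, count, limit):
--         if count == 1:
--             if 0 <= number <= limit:
--                 yield (number,)
--         else:
--             for i in range(0, min(number, limit) + 1, step):
--                 for result in _partition(number - i, count - 1, limit):
--                     yield (i,) + result
--
--     # Generate partitions.
--     partitions = list(_partition(total_budget, num_stocks, total_budget))
--
--     # Convert partitions into a list of dictionaries representing investments.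
--     investments = []
--     for part in partitions:
--         investment_dict = {stock_code: part[idx] for idx, stock_code in enumerate(stock_list)}
--         investments.append(investment_dict)
--
--     return investments
-- ===== SOURCE B (Python) =====
-- def _generate_investments(stock_list, step, total_budget):
--     # Iterative worklist: build compositions position by position (no recursion).
--     n = len(stock_list)
--     work = [((), total_budget)]
--     for _ in range(n - 1):
--         work = [(part + (i,), rem - i)
--                 for part, rem in work
--                 for i in range(0, min(rem, total_budget) + 1, step)]
--     tuples = [part + (rem,) for part, rem in work if 0 <= rem <= total_budget]
--     return [dict(zip(stock_list, t)) for t in tuples]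
-- ===== Notes on version B (the rewrite author's own statement) =====
-- stated objective: alternative
-- what changed: Replaces A's recursive generator (_partition) and per-tuple enumerate-indexed dict comprehension with an iterative breadth-first worklist that extends partial compositions level by level and zips each finished tuple with the stock list.
-- outside the precondition, e.g. on _generate_investments([], 1, -1): A returns [], B returns []; on _generate_investments([], -1, 0): A returns [], B returns [{}]
import Mathlib
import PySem

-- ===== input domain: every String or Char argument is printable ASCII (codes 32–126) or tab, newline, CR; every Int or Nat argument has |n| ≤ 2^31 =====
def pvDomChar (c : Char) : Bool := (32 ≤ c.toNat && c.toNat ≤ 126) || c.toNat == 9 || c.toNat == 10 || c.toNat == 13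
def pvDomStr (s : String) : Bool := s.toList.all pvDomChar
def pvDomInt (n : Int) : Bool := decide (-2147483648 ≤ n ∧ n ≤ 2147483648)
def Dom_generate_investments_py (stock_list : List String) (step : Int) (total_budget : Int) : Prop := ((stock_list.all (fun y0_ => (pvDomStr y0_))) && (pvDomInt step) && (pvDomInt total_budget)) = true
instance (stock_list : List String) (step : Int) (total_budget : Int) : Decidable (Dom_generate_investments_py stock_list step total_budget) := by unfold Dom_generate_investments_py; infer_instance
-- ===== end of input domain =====

-- B replaces A's recursive generator with an iterative level-by-level worklist (alternative
-- decomposition, same cost); equivalence is about the return value (no mutation in either).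

-- ===== PORT A =====
-- A's recursive generator _partition(number, count, limit); count is the Nat length of the
-- stock list. At count = 0 Python diverges (RecursionError) or raises ValueError whenever the
-- range it builds is non-empty; Pre_ excludes the empty stock list, so the count = 0 branch is
-- unreachable under Pre_ and the port returns [] there.
def partitionA (step limit : Int) : Nat → Int → List (List Int)
  | 0, _ => []
  | 1, number => if 0 ≤ number ∧ number ≤ limit then [[number]] else []
  | (c+2), number =>
      (PySem.List.pyRange 0 (min number limit + 1) step).flatMap
        (fun i => (partitionA step limit (c+1) (number - i)).map (fun r => i :: r))

def generate_investments_py (stock_list : List String) (step : Int) (total_budget : Int) : List (List (String × Int)) :=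
  let num_stocks := stock_list.length
  let partitions := partitionA step total_budget num_stocks total_budget
  partitions.foldl (fun acc part =>
    acc ++ [((PySem.List.enumerate stock_list 0).foldl
      (fun d p => d.insert p.2 (PySem.List.pyGetD part p.1 0)) PySem.Dict.empty).items]) []

-- ===== PORT B =====
def generate_investments_py_alt (stock_list : List String) (step : Int) (total_budget : Int) : List (List (String × Int)) :=
  let n := stock_list.length
  let work := (List.range (n - 1)).foldl
    (fun w _ => w.flatMap (fun pr =>
      (PySem.List.pyRange 0 (min pr.2 total_budget + 1) step).map
        (fun i => (pr.1 ++ [i], pr.2 - i))))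
    [(([] : List Int), total_budget)]
  let tuples := (work.filter (fun pr => decide (0 ≤ pr.2) && decide (pr.2 ≤ total_budget))).map
    (fun pr => pr.1 ++ [pr.2])
  tuples.map (fun t =>
    ((stock_list.zip t).foldl (fun d p => d.insert p.1 p.2) PySem.Dict.empty).items)

-- ===== PRECONDITION & SPEC =====
-- Pre_ excludes the empty stock list (there A recurses forever for most budgets, returning []
-- only when its first range is empty) and step = 0 with two or more stocks (ValueError).
def Pre_generate_investments_py (stock_list : List String) (step : Int) (total_budget : Int) : Prop :=
  stock_list ≠ [] ∧ (step ≠ 0 ∨ stock_list.length = 1)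
instance (stock_list : List String) (step : Int) (total_budget : Int) : Decidable (Pre_generate_investments_py stock_list step total_budget) := by unfold Pre_generate_investments_py; infer_instance

def pvWitness_generate_investments_py : List String × Int × Int := (["AAPL", "MSFT"], 1, 2)

def Spec_generate_investments_py (stock_list : List String) (step : Int) (total_budget : Int) (out : List (List (String × Int))) : Prop := out = generate_investments_py_alt stock_list step total_budget
instance (stock_list : List String) (step : Int) (total_budget : Int) (out : List (List (String × Int))) : Decidable (Spec_generate_investments_py stock_list step total_budget out) := by unfold Spec_generate_investments_py; infer_instance

-- ===== CLAIM (what is proved, stated in full; the proofs are below) =====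
def Claim_equal_generate_investments_py : Prop := ∀ (stock_list : List String) (step : Int) (total_budget : Int), Dom_generate_investments_py stock_list step total_budget → Pre_generate_investments_py stock_list step total_budget → Spec_generate_investments_py stock_list step total_budget (generate_investments_py stock_list step total_budget)

-- ===== LEMMAS AND PROOFS =====

-- one level of B's worklist loop
def lvl (step limit : Int) (w : List (List Int × Int)) : List (List Int × Int) :=
  w.flatMap (fun pr =>
    (PySem.List.pyRange 0 (min pr.2 limit + 1) step).map (fun i => (pr.1 ++ [i], pr.2 - i)))

-- all length-c extensions of a partial with remaining budget rem (suffix, final remainder)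
def exts (step limit : Int) : Nat → Int → List (List Int × Int)
  | 0, rem => [([], rem)]
  | c+1, rem =>
      (PySem.List.pyRange 0 (min rem limit + 1) step).flatMap
        (fun i => (exts step limit c (rem - i)).map (fun q => (i :: q.1, q.2)))

theorem range_foldl_lvl (step limit : Int) :
    ∀ (c : Nat) (w : List (List Int × Int)),
      (List.range c).foldl (fun w _ => lvl step limit w) w =
      w.flatMap (fun pr => (exts step limit c pr.2).map (fun q => (pr.1 ++ q.1, q.2))) := by
  intro c
  induction c with
  | zero =>
      intro w
      simp [exts]
  | succ c ih =>
      intro w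
      rw [List.range_succ_eq_map, List.foldl_cons, List.foldl_map, ih]
      simp only [lvl, exts, List.flatMap_assoc, List.flatMap_map]
      apply List.flatMap_congr
      intro pr _
      rw [List.map_flatMap]
      apply List.flatMap_congr
      intro i _
      rw [List.map_map]
      apply List.map_congr_left
      intro q _
      simp

theorem partA_exts (step limit : Int) :
    ∀ (c : Nat) (rem : Int),
      partitionA step limit (c+1) rem =
      ((exts step limit c rem).filter
        (fun q => decide (0 ≤ q.2) && decide (q.2 ≤ limit))).map (fun q => q.1 ++ [q.2]) := by
  intro c
  induction c with
  | zero =>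
      intro rem
      by_cases h : 0 ≤ rem ∧ rem ≤ limit
      · simp [partitionA, exts, h, List.filter]
      · simp only [partitionA, exts, if_neg h]
        rcases not_and_or.mp h with h1 | h1 <;> simp [List.filter, h1]
  | succ c ih =>
      intro rem
      show (PySem.List.pyRange 0 (min rem limit + 1) step).flatMap _ = _
      simp only [exts, List.filter_flatMap, List.map_flatMap]
      apply List.flatMap_congr
      intro i _
      rw [ih, List.filter_map, List.map_map, List.map_map]
      apply List.map_congr_left
      intro q _
      simp

theorem exts_length (step limit : Int) :
    ∀ (c : Nat) (rem : Int) (q : List Int × Int),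
      q ∈ exts step limit c rem → q.1.length = c := by
  intro c
  induction c with
  | zero =>
      intro rem q hq
      simp [exts] at hq
      simp [hq]
  | succ c ih =>
      intro rem q hq
      simp only [exts, List.mem_flatMap, List.mem_map] at hq
      obtain ⟨i, _, q', hq', rfl⟩ := hq
      simp [ih _ _ hq']

theorem enum_map_zip :
    ∀ (xs : List String) (t : List Int) (m : Nat), xs.length + m ≤ t.length →
      (PySem.List.enumerate xs (m : Int)).map
        (fun p => (p.2, PySem.List.pyGetD t p.1 0)) = xs.zip (t.drop m) := by
  intro xs
  induction xs with
  | nil => intro t m _; simp [PySem.List.enumerate_nil]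
  | cons x xs ih =>
      intro t m h
      have hm : m < t.length := by simp at h; omega
      rw [PySem.List.enumerate_cons, List.drop_eq_getElem_cons hm]
      simp only [List.map_cons, List.zip_cons_cons]
      have h1 : PySem.List.pyGetD t ((m : Int)) 0 = t[m] := by
        rw [PySem.List.pyGetD_natCast, List.getD_eq_getElem t 0 hm]
      have h2 : ((m : Int) + 1) = ((m + 1 : Nat) : Int) := by push_cast; ring
      rw [h1, h2, ih t (m + 1) (by simp at h ⊢; omega)]

theorem dict_eq (xs : List String) (t : List Int) (h : xs.length = t.length) :
    (PySem.List.enumerate xs 0).foldl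
      (fun d p => d.insert p.2 (PySem.List.pyGetD t p.1 0)) PySem.Dict.empty
    = (xs.zip t).foldl (fun d p => d.insert p.1 p.2) PySem.Dict.empty := by
  have hz := enum_map_zip xs t 0 (by omega)
  rw [Nat.cast_zero, List.drop_zero] at hz
  rw [← hz, List.foldl_map]

-- ===== VERDICT (by name: the statement is the Claim_ definition above) =====
theorem generate_investments_py_spec : Claim_equal_generate_investments_py := by
  intro sl step b _ hpre
  obtain ⟨hne, -⟩ := hpre
  have hm : ∃ m, sl.length = m + 1 := by
    cases sl with
    | nil => exact absurd rfl hne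
    | cons a l => exact ⟨l.length, rfl⟩
  obtain ⟨m, hm⟩ := hm
  unfold Spec_generate_investments_py generate_investments_py generate_investments_py_alt
  dsimp only
  rw [PySem.List.foldl_append_singleton_eq_map]
  have hB := range_foldl_lvl step b (sl.length - 1) [(([] : List Int), b)]
  simp only [lvl, List.flatMap_cons, List.flatMap_nil, List.append_nil, List.nil_append] at hB
  rw [hB, hm, Nat.add_sub_cancel, partA_exts]
  have hid : (exts step b m b).map (fun q => (q.1, q.2)) = exts step b m b := by
    simp
  rw [hid, List.map_map, List.map_map]
  apply List.map_congr_left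
  intro q hq
  have hq2 : q ∈ exts step b m b := List.mem_of_mem_filter hq
  have hlen : sl.length = (q.1 ++ [q.2]).length := by
    simp [hm, exts_length step b m b q hq2]
  simp only [Function.comp]
  exact congrArg PySem.Dict.items (dict_eq sl (q.1 ++ [q.2]) hlen)
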